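-- pv_equiv track=rewrite | github.com/TarunGoel93/sdehunt-py | Step-01/Level-06/Q-03.py | mostFreqEle
-- ===== SOURCE A (Python) =====
-- def mostFreqEle(arr):
--     count_map = {}
--     for i in arr:
--         if i in count_map:
--             count_map[i]+=1
--         else:
--             count_map[i]=1
--     max = 0
--     r = -1
--     for key,value in count_map.items():
--         if value>max or (value == max and key > r):
--             max = value
--             r = key
--     return r
-- ===== SOURCE B (Python) =====
-- def mostFreqEle(arr):
--     mx = 0
--     r = -1
--     run = 0
--     prev = None
--     for x in sorted(arr, reverse=True):
--         if run and x == prev: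
--             run += 1
--         else:
--             run = 1
--             prev = x
--         if run > mx:
--             mx = run
--             r = x
--     return r
-- ===== Notes on version B (the rewrite author's own statement) =====
-- stated objective: alternative
-- what changed: Replaces the hash-map counting pass plus a scan over the dict items by sorting the list in descending order and scanning consecutive equal runs, keeping the first (largest-key) run of maximal length.
import Mathlib
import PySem

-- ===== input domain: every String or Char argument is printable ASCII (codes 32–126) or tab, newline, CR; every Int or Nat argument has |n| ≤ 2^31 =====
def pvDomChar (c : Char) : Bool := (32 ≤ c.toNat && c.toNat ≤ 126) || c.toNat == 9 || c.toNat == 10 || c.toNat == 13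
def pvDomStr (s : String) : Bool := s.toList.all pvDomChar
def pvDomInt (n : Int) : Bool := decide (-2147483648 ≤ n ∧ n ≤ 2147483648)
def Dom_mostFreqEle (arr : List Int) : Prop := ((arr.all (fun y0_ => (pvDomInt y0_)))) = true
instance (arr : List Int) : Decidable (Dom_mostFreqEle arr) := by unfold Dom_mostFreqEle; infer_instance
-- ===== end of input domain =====

-- B replaces A's hash-map counting pass + dict-items scan by sort-descending + one scan of
-- consecutive equal runs (alternative algorithm, same return value; not claimed faster).

-- ===== PORT A =====
-- count dict built exactly as A does (if-contains branch), then the items scan with (max, r).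
def mostFreqEle (arr : List Int) : Int :=
  let count_map := arr.foldl
    (fun d i => if d.contains i then d.insert i (d.getD i 0 + 1) else d.insert i 1)
    PySem.Dict.empty
  let st := count_map.items.foldl
    (fun (s : Int × Int) kv =>
      if kv.2 > s.1 ∨ (kv.2 = s.1 ∧ kv.1 > s.2) then (kv.2, kv.1) else s)
    (0, -1)
  st.2

-- ===== PORT B =====
-- loop body of Source B: state (mx, r, run, prev); prev is None before the first element.
def stepB (st : Int × Int × Int × Option Int) (x : Int) : Int × Int × Int × Option Int :=
  let rp := if st.2.2.1 ≠ 0 ∧ st.2.2.2 = some x then (st.2.2.1 + 1, st.2.2.2) else (1, some x)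
  if rp.1 > st.1 then (rp.1, x, rp.1, rp.2) else (st.1, st.2.1, rp.1, rp.2)

def mostFreqEle_alt (arr : List Int) : Int :=
  let st := (PySem.List.sorted arr (fun x => x) true).foldl stepB (0, -1, 0, none)
  st.2.1

-- ===== PRECONDITION & SPEC =====
def Spec_mostFreqEle (arr : List Int) (out : Int) : Prop := out = mostFreqEle_alt arr
instance (arr : List Int) (out : Int) : Decidable (Spec_mostFreqEle arr out) := by unfold Spec_mostFreqEle; infer_instance

-- ===== CLAIM (what is proved, stated in full; the proofs are below) =====
def Claim_equal_mostFreqEle : Prop := ∀ (arr : List Int), Dom_mostFreqEle arr → Spec_mostFreqEle arr (mostFreqEle arr)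

-- ===== LEMMAS AND PROOFS =====

-- "take the lexicographically larger of (count, key), preferring the old state on a tie":
-- the common reference step both programs reduce to.
def lexstep (s p : Int × Int) : Int × Int :=
  if p.1 > s.1 ∨ (p.1 = s.1 ∧ p.2 > s.2) then p else s

lemma lexstep_comm (s p q : Int × Int) : lexstep (lexstep s p) q = lexstep (lexstep s q) p := by
  obtain ⟨a, b⟩ := s; obtain ⟨c, d⟩ := p; obtain ⟨e, f⟩ := q
  simp only [lexstep]
  split_ifs <;> first
    | rfl
    | (exfalso; omega)
    | (refine Prod.ext ?_ ?_ <;> simp <;> omega)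

-- A's count_map is PySem.Dict.counter arr.
lemma countmap_eq_counter (arr : List Int) :
    arr.foldl
      (fun d i => if d.contains i then d.insert i (d.getD i 0 + 1) else d.insert i 1)
      PySem.Dict.empty = PySem.Dict.counter arr := by
  have h : (fun (d : PySem.Dict Int Int) i =>
      if d.contains i then d.insert i (d.getD i 0 + 1) else d.insert i 1)
      = fun d i => d.insert i (d.getD i 0 + 1) := by
    funext d i
    by_cases hc : d.contains i
    · simp [hc]
    · have h0 : d.getD i 0 = 0 :=
        PySem.Dict.getD_of_not_contains d 0 (by simpa using hc)
      simp [hc, h0]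
  rw [h, PySem.Dict.foldl_insert_getD_add_one_eq_counter]

-- A = the lexstep fold over the distinct elements (first-occurrence order) with their counts.
lemma a_char (arr : List Int) :
    mostFreqEle arr
      = ((PySem.Set.ofList arr).foldl
          (fun s k => lexstep s ((arr.count k : Int), k)) (0, -1)).2 := by
  show ((arr.foldl
      (fun d i => if d.contains i then d.insert i (d.getD i 0 + 1) else d.insert i 1)
      PySem.Dict.empty).items.foldl
      (fun (s : Int × Int) kv =>
        if kv.2 > s.1 ∨ (kv.2 = s.1 ∧ kv.1 > s.2) then (kv.2, kv.1) else s) (0, -1)).2 = _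
  rw [countmap_eq_counter, PySem.Dict.items_counter, List.foldl_map]
  rfl

-- B-side: folding stepB over a run of c more copies of k, with an open run of length run ≤ mx.
lemma foldB_replicate (c : Nat) : ∀ (mx r run k : Int), 1 ≤ run → run ≤ mx →
    List.foldl stepB (mx, r, run, some k) (List.replicate c k)
      = (if run + (c : Int) > mx then run + c else mx,
         (if run + (c : Int) > mx then k else r, (run + c, some k))) := by
  induction c with
  | zero =>
    intro mx r run k h1 h2
    have hng : ¬ (run + ((0 : Nat) : Int) > mx) := by push_cast; omega
    rw [List.replicate_zero, List.foldl_nil, if_neg hng, if_neg hng]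
    simp
  | succ c ih =>
    intro mx r run k h1 h2
    rw [List.replicate_succ, List.foldl_cons]
    have hne : run ≠ 0 := by omega
    have hrp : stepB (mx, r, run, some k) k
        = if run + 1 > mx then (run + 1, k, run + 1, some k) else (mx, r, run + 1, some k) := by
      simp [stepB, hne]
    rw [hrp]
    by_cases hb : run + 1 > mx
    · rw [if_pos hb, ih (run + 1) k (run + 1) k (by omega) le_rfl]
      simp only [Prod.mk.injEq]
      refine ⟨?_, ?_, ?_, trivial⟩ <;> (try split_ifs) <;> omega
    · rw [if_neg hb, ih mx r (run + 1) k (by omega) (by omega)]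
      simp only [Prod.mk.injEq]
      refine ⟨?_, ?_, ?_, trivial⟩ <;> (try split_ifs) <;> omega

-- B-side main lemma: scanning the flattened runs equals the lexstep fold over the keys,
-- provided keys strictly decrease, counts are ≥ 1, no run is open on a coming key,
-- and (no-tie invariant) every coming key is below r unless mx = 0.
lemma b_main (ks : List Int) : ∀ (mx r run : Int) (prev : Option Int) (cnt : Int → Nat),
    ks.Pairwise (fun a b => b < a) →
    (∀ k ∈ ks, 1 ≤ cnt k) →
    (∀ k ∈ ks, prev ≠ some k) →
    0 ≤ mx →
    (∀ k ∈ ks, mx = 0 ∨ k < r) →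
    (List.foldl stepB (mx, r, run, prev) (ks.flatMap (fun k => List.replicate (cnt k) k))).2.1
      = (ks.foldl (fun s k => lexstep s ((cnt k : Int), k)) (mx, r)).2 := by
  induction ks with
  | nil => intro mx r run prev cnt _ _ _ _ _; rfl
  | cons k ks ih =>
    intro mx r run prev cnt hpw hcnt hprev hmx hinv
    obtain ⟨hk_lt, hpw'⟩ := List.pairwise_cons.mp hpw
    obtain ⟨c, hc⟩ : ∃ c, cnt k = c + 1 := by
      have := hcnt k (List.mem_cons_self ..); exact ⟨cnt k - 1, by omega⟩
    rw [List.flatMap_cons, List.foldl_append, hc, List.replicate_succ, List.foldl_cons]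
    have hstep : stepB (mx, r, run, prev) k
        = if (1 : Int) > mx then (1, k, 1, some k) else (mx, r, 1, some k) := by
      simp only [stepB]
      have hne : ¬ (run ≠ 0 ∧ prev = some k) := by
        rintro ⟨-, h⟩; exact hprev k (List.mem_cons_self ..) h
      rw [if_neg hne]
    rw [hstep]
    have hkc : ((cnt k : Int)) = (c : Int) + 1 := by rw [hc]; push_cast; ring
    by_cases h1 : (1 : Int) > mx
    · -- mx = 0
      have hmx0 : mx = 0 := by omega
      rw [if_pos h1, foldB_replicate c 1 k 1 k le_rfl le_rfl]
      have e1 : (if (1 : Int) + (c : Int) > 1 then (1 : Int) + c else 1) = (c : Int) + 1 := by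
        split_ifs <;> omega
      have e2 : (if (1 : Int) + (c : Int) > 1 then k else k) = k := by split_ifs <;> rfl
      rw [e1, e2]
      have hlex : lexstep (mx, r) ((cnt k : Int), k) = ((c : Int) + 1, k) := by
        simp only [lexstep, hkc, hmx0]
        rw [if_pos (by left; omega)]
      rw [List.foldl_cons, hlex]
      refine ih ((c : Int) + 1) k ((1 : Int) + c) (some k) cnt hpw'
        (fun x hx => hcnt x (List.mem_cons_of_mem _ hx))
        (fun x hx h => by
          have := hk_lt x hx; rw [Option.some.injEq] at h; omega)
        (by omega)
        (fun x hx => Or.inr (hk_lt x hx))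
    · -- mx ≥ 1
      rw [if_neg h1, foldB_replicate c mx r 1 k le_rfl (by omega)]
      have hkr := hinv k (List.mem_cons_self ..)
      have hMR : lexstep (mx, r) ((cnt k : Int), k)
          = (if (1 : Int) + (c : Int) > mx then (1 : Int) + (c : Int) else mx,
             if (1 : Int) + (c : Int) > mx then k else r) := by
        simp only [lexstep]
        split_ifs <;> simp only [Prod.mk.injEq] <;> constructor <;> first | trivial | omega
      rw [List.foldl_cons, hMR]
      exact ih _ _ _ _ cnt hpw'
        (fun x hx => hcnt x (List.mem_cons_of_mem _ hx))
        (fun x hx h => by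
          have := hk_lt x hx; rw [Option.some.injEq] at h; omega)
        (by split_ifs <;> omega)
        (fun x hx => Or.inr (by
          have hxk := hk_lt x hx
          have h2 := hinv x (List.mem_cons_of_mem _ hx)
          split_ifs <;> omega))

-- the descending distinct keys of arr
def descKeys (arr : List Int) : List Int :=
  PySem.List.sorted (PySem.Set.ofList arr) (fun x => x) true

lemma descKeys_pairwise (arr : List Int) : (descKeys arr).Pairwise (fun a b => b < a) := by
  have hle : (descKeys arr).Pairwise (fun a b => b ≤ a) :=
    PySem.List.sorted_pairwise_rev _ _
  have hnd : (descKeys arr).Nodup :=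
    (PySem.List.sorted_perm (PySem.Set.ofList arr) (fun x => x) true).nodup_iff.mpr
      (PySem.Set.nodup_ofList arr)
  exact (hle.and hnd).imp (fun h => lt_of_le_of_ne h.1 (Ne.symm h.2))

lemma mem_descKeys (arr : List Int) (v : Int) : v ∈ descKeys arr ↔ v ∈ arr := by
  rw [descKeys, PySem.List.mem_sorted, PySem.Set.mem_ofList]

-- the flattened runs: each key repeated its count many times, keys descending
lemma count_flat (arr : List Int) (v : Int) : ∀ (ks : List Int), ks.Nodup →
    List.count v (ks.flatMap (fun k => List.replicate (arr.count k) k))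
      = if v ∈ ks then arr.count v else 0 := by
  intro ks
  induction ks with
  | nil => intro _; simp
  | cons k ks ih =>
    intro hnd
    rw [List.flatMap_cons, List.count_append, List.count_replicate,
      ih hnd.of_cons]
    by_cases hv : v = k
    · subst hv
      have : v ∉ ks := (List.nodup_cons.mp hnd).1
      simp [this]
    · simp [hv, Ne.symm hv]

lemma flat_perm (arr : List Int) :
    ((descKeys arr).flatMap (fun k => List.replicate (arr.count k) k)).Perm arr := by
  rw [List.perm_iff_count]
  intro v
  have hnd : (descKeys arr).Nodup :=
    (PySem.List.sorted_perm (PySem.Set.ofList arr) (fun x => x) true).nodup_iff.mpr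
      (PySem.Set.nodup_ofList arr)
  rw [count_flat arr v (descKeys arr) hnd]
  by_cases hv : v ∈ arr
  · simp [(mem_descKeys arr v).mpr hv]
  · have : v ∉ descKeys arr := fun h => hv ((mem_descKeys arr v).mp h)
    simp [this, List.count_eq_zero_of_not_mem hv]

lemma flat_pairwise_aux (arr : List Int) (ks : List Int)
    (hpw : ks.Pairwise (fun a b => b < a)) :
    (ks.flatMap (fun k => List.replicate (arr.count k) k)).Pairwise (fun a b => b ≤ a) := by
  induction hpw with
  | nil => simp
  | @cons k ks hk_lt hpw' ih =>
    rw [List.flatMap_cons, List.pairwise_append]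
    refine ⟨List.pairwise_replicate.mpr (Or.inr le_rfl), ih, ?_⟩
    intro a ha b hb
    have ha' : a = k := List.eq_of_mem_replicate ha
    obtain ⟨k', hk', hb'⟩ := List.mem_flatMap.mp hb
    have hb'' : b = k' := List.eq_of_mem_replicate hb'
    have := hk_lt k' hk'
    omega

-- sorted(arr, reverse=True) is exactly the flattened descending runs
lemma sorted_eq_flat (arr : List Int) :
    PySem.List.sorted arr (fun x => x) true
      = (descKeys arr).flatMap (fun k => List.replicate (arr.count k) k) := by
  have hperm : (PySem.List.sorted arr (fun x => x) true).Perm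
      ((descKeys arr).flatMap (fun k => List.replicate (arr.count k) k)) :=
    (PySem.List.sorted_perm arr (fun x => x) true).trans (flat_perm arr).symm
  exact List.Perm.eq_of_pairwise
    (fun a b _ _ h1 h2 => le_antisymm h2 h1)
    (PySem.List.sorted_pairwise_rev arr (fun x => x))
    (flat_pairwise_aux arr (descKeys arr) (descKeys_pairwise arr))
    hperm

lemma b_char (arr : List Int) :
    mostFreqEle_alt arr
      = ((descKeys arr).foldl
          (fun s k => lexstep s ((arr.count k : Int), k)) (0, -1)).2 := by
  show ((PySem.List.sorted arr (fun x => x) true).foldl stepB (0, -1, 0, none)).2.1 = _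
  rw [sorted_eq_flat]
  exact b_main (descKeys arr) 0 (-1) 0 none (fun k => arr.count k)
    (descKeys_pairwise arr)
    (fun k hk => List.count_pos_iff.mpr ((mem_descKeys arr k).mp hk))
    (fun k _ h => by cases h)
    le_rfl
    (fun _ _ => Or.inl rfl)

lemma fold_perm (arr : List Int) :
    ((PySem.Set.ofList arr).foldl (fun s k => lexstep s ((arr.count k : Int), k)) (0, -1))
      = ((descKeys arr).foldl (fun s k => lexstep s ((arr.count k : Int), k)) (0, -1)) := by
  unfold descKeys
  exact @List.Perm.foldl_eq _ _ (fun s k => lexstep s ((arr.count k : Int), k)) _ _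
    ⟨fun s k1 k2 => lexstep_comm s _ _⟩
    (PySem.List.sorted_perm (PySem.Set.ofList arr) (fun x => x) true).symm (0, -1)

-- ===== VERDICT (by name: the statement is the Claim_ definition above) =====
theorem mostFreqEle_spec : Claim_equal_mostFreqEle := by
  intro arr _
  show mostFreqEle arr = mostFreqEle_alt arr
  rw [a_char, b_char, fold_perm]
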